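-- pv_equiv track=rewrite | github.com/yyytae0/algorithm-training | programmers/1-40.py | solution
-- ===== SOURCE A (Python) =====
-- def solution(nums):
--     answer = 0
--     n = len(nums)
--     prime = [1 for _ in range(3000)]
--     prime[0], prime[1] = 0, 0
--     for i in range(2, 55):
--         if prime[i]:
--             for j in range(2, 1500):
--                 if i*j < 3000:
--                     prime[i*j] = 0
--                 else:
--                     break
--     dummy = 0
--     for i in range(n):
--         dummy += nums[i]
--         for j in range(i+1, n):
--             dummy += nums[j]
--             for k in range(j+1, n):
--                 dummy += nums[k]
--                 if prime[dummy]: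
--                     answer += 1
--                 dummy -= nums[k]
--             dummy -= nums[j]
--         dummy -= nums[i]
--
--     return answer
-- ===== SOURCE B (Python) =====
-- def solution(nums):
--     # Same prime table as the original; the O(n^3) triple index scan is replaced
--     # by a DP over dictionaries counting k-element (k = 1, 2, 3) subset sums.
--     prime = [1 for _ in range(3000)]
--     prime[0], prime[1] = 0, 0
--     for i in range(2, 55):
--         if prime[i]:
--             for j in range(2, 1500):
--                 if i*j < 3000:
--                     prime[i*j] = 0
--                 else:
--                     break
--     c1 = {}
--     c2 = {}
--     c3 = {}
--     for x in nums:
--         for s, c in list(c2.items()):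
--             c3[s + x] = c3.get(s + x, 0) + c
--         for s, c in list(c1.items()):
--             c2[s + x] = c2.get(s + x, 0) + c
--         c1[x] = c1.get(x, 0) + 1
--     answer = 0
--     for s, c in c3.items():
--         if prime[s]:
--             answer += c
--     return answer
-- ===== Notes on version B (the rewrite author's own statement) =====
-- stated objective: faster
-- what changed: The triple nested index scan over all i<j<k is replaced by a one-pass DP that maintains dictionaries counting 1-, 2- and 3-element subset sums, then sums the counts of prime 3-subset sums; the prime table is built exactly as in A.
import Mathlib
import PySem

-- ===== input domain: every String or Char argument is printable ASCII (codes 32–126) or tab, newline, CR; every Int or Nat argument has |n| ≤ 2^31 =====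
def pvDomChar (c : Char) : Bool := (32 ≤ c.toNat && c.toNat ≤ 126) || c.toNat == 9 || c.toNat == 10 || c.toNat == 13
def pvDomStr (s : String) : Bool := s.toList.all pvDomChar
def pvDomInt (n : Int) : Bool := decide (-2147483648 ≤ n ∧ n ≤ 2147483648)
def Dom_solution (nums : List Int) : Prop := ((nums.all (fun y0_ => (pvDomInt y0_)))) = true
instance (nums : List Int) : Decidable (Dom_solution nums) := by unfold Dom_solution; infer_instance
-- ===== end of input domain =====

-- B replaces A's O(n^3) triple index scan by a dictionary DP counting k-element
-- subset sums (k = 1, 2, 3); the prime table is built exactly as in A.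


-- ===== PORT A =====
-- inner 'for j in range(2, 1500)' with its break; prime[i*j] = 0 uses List.set
-- on (i*j).toNat, exact since 0 ≤ i*j < 3000 = length whenever it is reached
def pvMarkA (prime : List Int) (i : Int) : List Int → List Int
  | [] => prime
  | j :: js => if i * j < 3000 then pvMarkA (prime.set (i * j).toNat 0) i js else prime

-- the prime table of Source A (Source B builds it with the identical lines);
-- prime[i] in the sieve loop is in range (2 ≤ i < 55 < 3000), ported with pyGetD
def pvSieve : List Int :=
  (PySem.List.pyRange 2 55 1).foldl
    (fun prime i =>
      if PySem.List.pyGetD prime i 0 ≠ 0 then pvMarkA prime i (PySem.List.pyRange 2 1500 1)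
      else prime)
    (((List.replicate 3000 (1 : Int)).set 0 0).set 1 0)

-- state (answer, dummy); prime[dummy] may raise IndexError, hence Option
def pvBodyK (prime nums : List Int) (o : Option (Int × Int)) (k : Int) : Option (Int × Int) :=
  o.bind fun st =>
    (PySem.List.pyGet? prime (st.2 + PySem.List.pyGetD nums k 0)).map fun p =>
      (if p ≠ 0 then st.1 + 1 else st.1,
       st.2 + PySem.List.pyGetD nums k 0 - PySem.List.pyGetD nums k 0)

def pvLoopK (prime nums : List Int) (n j : Int) (st : Int × Int) : Option (Int × Int) :=
  (PySem.List.pyRange (j + 1) n 1).foldl (pvBodyK prime nums) (some st)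

def pvBodyJ (prime nums : List Int) (n : Int) (o : Option (Int × Int)) (j : Int) :
    Option (Int × Int) :=
  o.bind fun st =>
    (pvLoopK prime nums n j (st.1, st.2 + PySem.List.pyGetD nums j 0)).map fun r =>
      (r.1, r.2 - PySem.List.pyGetD nums j 0)

def pvLoopJ (prime nums : List Int) (n i : Int) (st : Int × Int) : Option (Int × Int) :=
  (PySem.List.pyRange (i + 1) n 1).foldl (pvBodyJ prime nums n) (some st)

def pvBodyI (prime nums : List Int) (n : Int) (o : Option (Int × Int)) (i : Int) :
    Option (Int × Int) :=
  o.bind fun st =>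
    (pvLoopJ prime nums n i (st.1, st.2 + PySem.List.pyGetD nums i 0)).map fun r =>
      (r.1, r.2 - PySem.List.pyGetD nums i 0)

def solution (nums : List Int) : Int :=
  (((PySem.List.pyRange 0 (nums.length : Int) 1).foldl
      (pvBodyI pvSieve nums (nums.length : Int)) (some (0, 0))).map (·.1)).getD 0

-- ===== PORT B =====
-- "for s, c in list(e.items()): d[s+x] = d.get(s+x, 0) + c"
def pvAddShift (x : Int) (d e : PySem.Dict Int Int) : PySem.Dict Int Int :=
  e.items.foldl (fun d p => d.insert (p.1 + x) (d.getD (p.1 + x) 0 + p.2)) d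

def pvStep (st : PySem.Dict Int Int × PySem.Dict Int Int × PySem.Dict Int Int) (x : Int) :
    PySem.Dict Int Int × PySem.Dict Int Int × PySem.Dict Int Int :=
  (st.1.insert x (st.1.getD x 0 + 1), pvAddShift x st.2.1 st.1, pvAddShift x st.2.2 st.2.1)

-- final loop: prime[s] may raise IndexError, hence Option, like in port A
def pvSumBody (o : Option Int) (p : Int × Int) : Option Int :=
  o.bind fun a =>
    (PySem.List.pyGet? pvSieve p.1).map fun q => if q ≠ 0 then a + p.2 else a

def solution_alt (nums : List Int) : Int :=
  (((nums.foldl pvStep (PySem.Dict.empty, PySem.Dict.empty, PySem.Dict.empty)).2.2.items.foldl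
      pvSumBody (some 0)).getD 0)

-- ===== PRECONDITION & SPEC =====
-- Pre_ excludes exactly the inputs where some 3-element combination's sum falls
-- outside [-3000, 3000): there both programs raise IndexError on prime[sum].
def Pre_solution (nums : List Int) : Prop :=
  ∀ c ∈ PySem.List.combinations nums 3, -3000 ≤ c.sum ∧ c.sum < 3000

instance (nums : List Int) : Decidable (Pre_solution nums) := by
  unfold Pre_solution; infer_instance

def pvWitness_solution : List Int := [2, 2, 3]

def Spec_solution (nums : List Int) (out : Int) : Prop := out = solution_alt nums
instance (nums : List Int) (out : Int) : Decidable (Spec_solution nums out) := by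
  unfold Spec_solution; infer_instance

-- ===== CLAIM (what is proved, stated in full; the proofs are below) =====
def Claim_equal_solution : Prop :=
  ∀ (nums : List Int), Dom_solution nums → Pre_solution nums → Spec_solution nums (solution nums)

-- ===== LEMMAS AND PROOFS =====

-- the Bool test both ports apply to an in-range sum s: prime[s] != 0
def pvP (s : Int) : Bool := ((PySem.List.pyGet? pvSieve s).getD 0) != 0

-- sums of the k-element sublists of the list, shifted by d, in A's scan order
def pvSums : Nat → Int → List Int → List Int
  | 0, d, _ => [d]
  | _ + 1, _, [] => []
  | k + 1, d, x :: xs => pvSums k (d + x) xs ++ pvSums (k + 1) d xs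

theorem pvSums_zero (d : Int) (l : List Int) : pvSums 0 d l = [d] := by cases l <;> rfl

def pvInR (s : Int) : Prop := -3000 ≤ s ∧ s < 3000

theorem pvMarkA_length (i : Int) : ∀ (js : List Int) (prime : List Int),
    (pvMarkA prime i js).length = prime.length := by
  intro js
  induction js with
  | nil => intro prime; rfl
  | cons j js ih =>
      intro prime
      simp only [pvMarkA]
      split
      · rw [ih]; simp
      · rfl

theorem pvSieve_length : pvSieve.length = 3000 := by
  unfold pvSieve
  have h : ∀ (l : List Int) (acc : List Int),
      (l.foldl (fun prime i =>
        if PySem.List.pyGetD prime i 0 ≠ 0 then pvMarkA prime i (PySem.List.pyRange 2 1500 1)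
        else prime) acc).length = acc.length := by
    intro l
    induction l with
    | nil => intro acc; rfl
    | cons x xs ih =>
        intro acc
        simp only [List.foldl_cons]
        rw [ih]
        split
        · rw [pvMarkA_length]
        · rfl
  rw [h, List.length_set, List.length_set, List.length_replicate]

theorem pvGet_some {s : Int} (h : pvInR s) :
    PySem.List.pyGet? pvSieve s = some ((PySem.List.pyGet? pvSieve s).getD 0) := by
  have hne : PySem.List.pyGet? pvSieve s ≠ none := by
    intro hn
    rw [PySem.List.pyGet?_eq_none_iff, pvSieve_length] at hn
    exact hn ⟨by exact_mod_cast h.1, by exact_mod_cast h.2⟩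
  cases hg : PySem.List.pyGet? pvSieve s with
  | none => exact absurd hg hne
  | some p => rfl

theorem mem_pvSums {v : Int} : ∀ (l : List Int) (k : Nat) (d : Int),
    v ∈ pvSums k d l → ∃ c : List Int, c.Sublist l ∧ c.length = k ∧ v = d + c.sum := by
  intro l
  induction l with
  | nil =>
      intro k d hv
      cases k with
      | zero =>
          simp [pvSums] at hv
          exact ⟨[], List.Sublist.refl _, rfl, by simp [hv]⟩
      | succ k => simp [pvSums] at hv
  | cons x xs ih =>
      intro k d hv
      cases k with
      | zero =>
          simp [pvSums] at hv
          exact ⟨[], List.nil_sublist _, rfl, by simp [hv]⟩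
      | succ k =>
          simp only [pvSums, List.mem_append] at hv
          rcases hv with hv | hv
          · obtain ⟨c, hc1, hc2, hc3⟩ := ih k (d + x) hv
            exact ⟨x :: c, List.Sublist.cons₂ x hc1, by simp [hc2], by simp [hc3]; ring⟩
          · obtain ⟨c, hc1, hc2, hc3⟩ := ih (k + 1) d hv
            exact ⟨c, List.Sublist.cons x hc1, hc2, hc3⟩

theorem pre_inR {nums : List Int} (hpre : Pre_solution nums) :
    ∀ v ∈ pvSums 3 0 nums, pvInR v := by
  intro v hv
  obtain ⟨c, hc1, hc2, hc3⟩ := mem_pvSums nums 3 0 hv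
  have := hpre c ((PySem.List.mem_combinations_iff nums 3 c).2 ⟨hc1, hc2⟩)
  exact ⟨by omega, by omega⟩

-- ===== A-side characterisation =====
theorem drop_facts {nums u : List Int} {x : Int} {s : Int} (hs : 0 ≤ s)
    (hdrop : nums.drop s.toNat = x :: u) :
    s < (nums.length : Int) ∧ PySem.List.pyGetD nums s 0 = x
      ∧ nums.drop (s + 1).toNat = u := by
  have hlt : s.toNat < nums.length := by
    by_contra hc
    rw [List.drop_eq_nil_of_le (by omega)] at hdrop
    exact absurd hdrop (by simp)
  refine ⟨by omega, ?_, ?_⟩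
  · have h1 : nums[s.toNat]? = some x := by
      have h2 : (List.drop s.toNat nums)[(0 : Nat)]? = nums[s.toNat + 0]? :=
        List.getElem?_drop
      rw [hdrop] at h2
      simpa using h2.symm
    rw [PySem.List.pyGetD_of_nonneg nums 0 hs, List.getD_eq_getElem?_getD, h1]
    rfl
  · have : (s + 1).toNat = s.toNat + 1 := by omega
    rw [this, ← List.tail_drop, hdrop]
    rfl

theorem loopK_eq (nums : List Int) (d : Int) :
    ∀ (u : List Int) (s : Int), 0 ≤ s → nums.drop s.toNat = u →
      ∀ (a : Int), (∀ v ∈ pvSums 1 d u, pvInR v) →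
      (PySem.List.pyRange s (nums.length : Int) 1).foldl (pvBodyK pvSieve nums) (some (a, d))
        = some (a + ((pvSums 1 d u).countP pvP : Int), d) := by
  intro u
  induction u with
  | nil =>
      intro s hs hdrop a _
      rw [PySem.List.pyRange_one_eq_nil (by
        have := List.drop_eq_nil_iff.mp hdrop
        omega)]
      simp [pvSums]
  | cons x t ih =>
      intro s hs hdrop a h
      obtain ⟨hlt, hget, hdrop'⟩ := drop_facts hs hdrop
      have hmem : pvInR (d + x) := h (d + x) (by simp [pvSums])
      rw [PySem.List.pyRange_one_cons hlt, List.foldl_cons]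
      have hbody : pvBodyK pvSieve nums (some (a, d)) s
          = some (if pvP (d + x) then a + 1 else a, d) := by
        simp only [pvBodyK, Option.bind_some, hget]
        rw [pvGet_some hmem, Option.map_some]
        have hd : d + x - x = d := by ring
        rw [hd]
        set X := (PySem.List.pyGet? pvSieve (d + x)).getD 0 with hX
        have hP : pvP (d + x) = (X != 0) := by rw [pvP, hX]
        rw [hP]
        by_cases hX0 : X = 0 <;> simp [hX0]
      rw [hbody]
      rw [ih (s + 1) (by omega) hdrop' _ (fun v hv => h v (by simp [pvSums]; tauto))]
      have : (pvSums 1 d (x :: t)).countP pvP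
          = (if pvP (d + x) then 1 else 0) + (pvSums 1 d t).countP pvP := by
        simp only [pvSums, List.countP_append, List.countP_cons, List.countP_nil]
        split_ifs <;> simp_all
      rw [this]
      simp only [Option.some.injEq, Prod.mk.injEq]
      refine ⟨?_, trivial⟩
      split_ifs with hP <;> push_cast <;> omega

theorem loopJ_eq (nums : List Int) (d : Int) :
    ∀ (u : List Int) (s : Int), 0 ≤ s → nums.drop s.toNat = u →
      ∀ (a : Int), (∀ v ∈ pvSums 2 d u, pvInR v) →
      (PySem.List.pyRange s (nums.length : Int) 1).foldl
          (pvBodyJ pvSieve nums (nums.length : Int)) (some (a, d))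
        = some (a + ((pvSums 2 d u).countP pvP : Int), d) := by
  intro u
  induction u with
  | nil =>
      intro s hs hdrop a _
      rw [PySem.List.pyRange_one_eq_nil (by
        have := List.drop_eq_nil_iff.mp hdrop
        omega)]
      simp [pvSums]
  | cons x t ih =>
      intro s hs hdrop a h
      obtain ⟨hlt, hget, hdrop'⟩ := drop_facts hs hdrop
      rw [PySem.List.pyRange_one_cons hlt, List.foldl_cons]
      have hbody : pvBodyJ pvSieve nums (nums.length : Int) (some (a, d)) s
          = some (a + ((pvSums 1 (d + x) t).countP pvP : Int), d) := by
        simp only [pvBodyJ, Option.bind_some, hget, pvLoopK]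
        rw [loopK_eq nums (d + x) t (s + 1) (by omega) hdrop' a
          (fun v hv => h v (by simp [pvSums]; tauto))]
        simp only [Option.map_some, Option.some.injEq, Prod.mk.injEq]
        exact ⟨trivial, by ring⟩
      rw [hbody]
      rw [ih (s + 1) (by omega) hdrop' _ (fun v hv => h v (by simp [pvSums]; tauto))]
      have : (pvSums 2 d (x :: t)).countP pvP
          = (pvSums 1 (d + x) t).countP pvP + (pvSums 2 d t).countP pvP := by
        simp [pvSums, List.countP_append]
      rw [this]
      simp only [Option.some.injEq, Prod.mk.injEq]
      refine ⟨?_, trivial⟩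
      push_cast
      ring

theorem loopI_eq (nums : List Int) (d : Int) :
    ∀ (u : List Int) (s : Int), 0 ≤ s → nums.drop s.toNat = u →
      ∀ (a : Int), (∀ v ∈ pvSums 3 d u, pvInR v) →
      (PySem.List.pyRange s (nums.length : Int) 1).foldl
          (pvBodyI pvSieve nums (nums.length : Int)) (some (a, d))
        = some (a + ((pvSums 3 d u).countP pvP : Int), d) := by
  intro u
  induction u with
  | nil =>
      intro s hs hdrop a _
      rw [PySem.List.pyRange_one_eq_nil (by
        have := List.drop_eq_nil_iff.mp hdrop
        omega)]
      simp [pvSums]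
  | cons x t ih =>
      intro s hs hdrop a h
      obtain ⟨hlt, hget, hdrop'⟩ := drop_facts hs hdrop
      rw [PySem.List.pyRange_one_cons hlt, List.foldl_cons]
      have hbody : pvBodyI pvSieve nums (nums.length : Int) (some (a, d)) s
          = some (a + ((pvSums 2 (d + x) t).countP pvP : Int), d) := by
        simp only [pvBodyI, Option.bind_some, hget, pvLoopJ]
        rw [loopJ_eq nums (d + x) t (s + 1) (by omega) hdrop' a
          (fun v hv => h v (by simp [pvSums]; tauto))]
        simp only [Option.map_some, Option.some.injEq, Prod.mk.injEq]
        exact ⟨trivial, by ring⟩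
      rw [hbody]
      rw [ih (s + 1) (by omega) hdrop' _ (fun v hv => h v (by simp [pvSums]; tauto))]
      have : (pvSums 3 d (x :: t)).countP pvP
          = (pvSums 2 (d + x) t).countP pvP + (pvSums 3 d t).countP pvP := by
        simp [pvSums, List.countP_append]
      rw [this]
      simp only [Option.some.injEq, Prod.mk.injEq]
      refine ⟨?_, trivial⟩
      push_cast
      ring

theorem solution_char (nums : List Int) (hpre : Pre_solution nums) :
    solution nums = ((pvSums 3 0 nums).countP pvP : Int) := by
  unfold solution
  rw [loopI_eq nums 0 nums 0 le_rfl rfl 0 (pre_inR hpre)]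
  simp

-- ===== B-side characterisation =====
theorem getD_foldl_insert_add (x t : Int) :
    ∀ (L : List (Int × Int)) (d : PySem.Dict Int Int),
      (L.foldl (fun d p => d.insert (p.1 + x) (d.getD (p.1 + x) 0 + p.2)) d).getD t 0
        = d.getD t 0 + ((L.filter (fun p => p.1 + x == t)).map (·.2)).sum := by
  intro L
  induction L with
  | nil => intro d; simp
  | cons p R ih =>
      intro d
      rw [List.foldl_cons, ih]
      by_cases hp : p.1 + x = t
      · rw [List.filter_cons_of_pos (by simpa using hp)]
        rw [PySem.Dict.getD_insert]
        simp [hp]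
        ring
      · rw [List.filter_cons_of_neg (by simpa using hp)]
        rw [PySem.Dict.getD_insert]
        simp
        intro hc; exact absurd hc.symm hp

theorem filtered_sum_getD (k : Int) :
    ∀ (l : List (Int × Int)), (l.map (·.1)).Nodup →
      ((l.filter (fun p => p.1 == k)).map (·.2)).sum = (PySem.Dict.mk l).getD k 0 := by
  intro l
  induction l with
  | nil => intro _; simp [PySem.Dict.getD_eq_get?_getD]; rfl
  | cons p R ih =>
      intro hnd
      rw [PySem.Dict.getD_eq_get?_getD]
      obtain ⟨pk, pv⟩ := p
      rw [PySem.Dict.get?_mk_cons]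
      by_cases hp : pk = k
      · rw [List.filter_cons_of_pos (by simpa using hp)]
        have hrest : (R.filter (fun p => p.1 == k)) = [] := by
          rw [List.filter_eq_nil_iff]
          intro q hq
          simp only [List.map_cons, List.nodup_cons] at hnd
          have : q.1 ≠ pk := by
            intro he
            exact hnd.1 (he ▸ List.mem_map_of_mem hq)
          simpa using fun hc => this (by rw [hc, hp])
        simp [hrest, hp]
      · rw [List.filter_cons_of_neg (by simpa using hp)]
        rw [ih (by simp only [List.map_cons, List.nodup_cons] at hnd; exact hnd.2)]
        simp [hp, PySem.Dict.getD_eq_get?_getD]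

theorem getD_addShift (x t : Int) (d e : PySem.Dict Int Int) (he : e.keys.Nodup) :
    (pvAddShift x d e).getD t 0 = d.getD t 0 + e.getD (t - x) 0 := by
  rw [pvAddShift, getD_foldl_insert_add]
  congr 1
  have hfe : e.items.filter (fun p => p.1 + x == t) = e.items.filter (fun p => p.1 == t - x) := by
    apply List.filter_congr
    intro p _
    rw [Bool.eq_iff_iff]
    simp only [beq_iff_eq]
    omega
  rw [hfe]
  rw [filtered_sum_getD (t - x) e.items (by simpa [PySem.Dict.keys] using he)]

theorem get?_mk_mem_values : ∀ (l : List (Int × Int)) (k v : Int),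
    (PySem.Dict.mk l).get? k = some v → v ∈ l.map (·.2) := by
  intro l
  induction l with
  | nil => intro k v h; exact absurd h (by simp [PySem.Dict.get?])
  | cons p R ih =>
      intro k v h
      obtain ⟨pk, pv⟩ := p
      rw [PySem.Dict.get?_mk_cons] at h
      by_cases hp : pk = k
      · simp [hp] at h; simp [h]
      · rw [if_neg (by simpa using hp)] at h
        simp [ih k v h]

theorem get?_mem_values (d : PySem.Dict Int Int) {k v : Int} (h : d.get? k = some v) :
    v ∈ d.values := by
  obtain ⟨l⟩ := d
  exact get?_mk_mem_values l k v h

theorem getD_nonneg (d : PySem.Dict Int Int) (hv : ∀ w ∈ d.values, 0 < w) (t : Int) :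
    0 ≤ d.getD t 0 := by
  rw [PySem.Dict.getD_eq_get?_getD]
  cases hg : d.get? t with
  | none => simp
  | some v => simpa using le_of_lt (hv v (get?_mem_values d hg))

theorem values_addShift (x : Int) :
    ∀ (L : List (Int × Int)) (d : PySem.Dict Int Int), (∀ p ∈ L, 0 < p.2) →
      (∀ w ∈ d.values, 0 < w) →
      ∀ w ∈ (L.foldl (fun d p => d.insert (p.1 + x) (d.getD (p.1 + x) 0 + p.2)) d).values,
        0 < w := by
  intro L
  induction L with
  | nil => intro d _ hd; exact hd
  | cons p R ih =>
      intro d hL hd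
      rw [List.foldl_cons]
      apply ih _ (fun q hq => hL q (by simp [hq]))
      intro w hw
      rcases PySem.Dict.mem_values_insert _ _ _ _ hw with h | h
      · have h1 : 0 ≤ d.getD (p.1 + x) 0 := getD_nonneg d hd _
        have h2 : 0 < p.2 := hL p (by simp)
        omega
      · exact hd w h

theorem count_pvSums_append (x : Int) :
    ∀ (l : List Int) (k : Nat) (d s : Int),
      (pvSums (k + 1) d (l ++ [x])).count s
        = (pvSums (k + 1) d l).count s + (pvSums k d l).count (s - x) := by
  intro l
  induction l with
  | nil =>
      intro k d s
      match k with
      | 0 =>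
          simp [pvSums, List.count_singleton, List.count_nil]
          split_ifs <;> omega
      | k'' + 1 => simp [pvSums]
  | cons y ys ih =>
      intro k d s
      have hL : pvSums (k + 1) d ((y :: ys) ++ [x])
          = pvSums k (d + y) (ys ++ [x]) ++ pvSums (k + 1) d (ys ++ [x]) := rfl
      rw [hL, List.count_append]
      match k with
      | 0 =>
          rw [ih 0 d s]
          have h1 : pvSums 0 (d + y) (ys ++ [x]) = [d + y] := pvSums_zero _ _
          have h2 : pvSums 1 d (y :: ys) = [d + y] ++ pvSums 1 d ys := by
            rw [show pvSums 1 d (y :: ys) = pvSums 0 (d + y) ys ++ pvSums 1 d ys from rfl,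
              pvSums_zero]
          have h3 : pvSums 0 d (y :: ys) = [d] := pvSums_zero _ _
          have h4 : pvSums 0 d ys = [d] := pvSums_zero _ _
          rw [h1, h2, h3, h4, List.count_append]
          simp only [Nat.zero_add]
          omega
      | k'' + 1 =>
          rw [ih k'' (d + y) s, ih (k'' + 1) d s]
          have h2 : pvSums (k'' + 1 + 1) d (y :: ys)
              = pvSums (k'' + 1) (d + y) ys ++ pvSums (k'' + 1 + 1) d ys := rfl
          have h3 : pvSums (k'' + 1) d (y :: ys)
              = pvSums k'' (d + y) ys ++ pvSums (k'' + 1) d ys := rfl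
          rw [h2, h3, List.count_append, List.count_append]
          omega

def pvInv (p : List Int) (st : PySem.Dict Int Int × PySem.Dict Int Int × PySem.Dict Int Int) :
    Prop :=
  (∀ t, st.1.getD t 0 = ((pvSums 1 0 p).count t : Int))
  ∧ (∀ t, st.2.1.getD t 0 = ((pvSums 2 0 p).count t : Int))
  ∧ (∀ t, st.2.2.getD t 0 = ((pvSums 3 0 p).count t : Int))
  ∧ st.1.keys.Nodup ∧ st.2.1.keys.Nodup ∧ st.2.2.keys.Nodup
  ∧ (∀ w ∈ st.1.values, 0 < w) ∧ (∀ w ∈ st.2.1.values, 0 < w) ∧ (∀ w ∈ st.2.2.values, 0 < w)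

theorem items_pos {d : PySem.Dict Int Int} (hv : ∀ w ∈ d.values, 0 < w) :
    ∀ p ∈ d.items, 0 < p.2 := by
  intro p hp
  exact hv p.2 (List.mem_map_of_mem hp)

theorem inv_step (p : List Int) (st) (x : Int) (h : pvInv p st) :
    pvInv (p ++ [x]) (pvStep st x) := by
  obtain ⟨h1, h2, h3, hn1, hn2, hn3, hv1, hv2, hv3⟩ := h
  refine ⟨?_, ?_, ?_, ?_, ?_, ?_, ?_, ?_, ?_⟩
  · intro t
    show (st.1.insert x (st.1.getD x 0 + 1)).getD t 0 = _
    rw [PySem.Dict.getD_insert, count_pvSums_append x p 0 0 t, pvSums_zero]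
    by_cases ht : t = x
    · subst ht
      rw [if_pos rfl, h1 t]
      simp
    · rw [if_neg ht, h1 t]
      have hc0 : List.count (t - x) [(0 : Int)] = 0 := by
        simp only [List.count_singleton]
        simp
        omega
      rw [hc0]
      simp
  · intro t
    show (pvAddShift x st.2.1 st.1).getD t 0 = _
    rw [getD_addShift x t _ _ hn1, h2 t, h1 (t - x), count_pvSums_append x p 1 0 t]
    push_cast
    ring
  · intro t
    show (pvAddShift x st.2.2 st.2.1).getD t 0 = _
    rw [getD_addShift x t _ _ hn2, h3 t, h2 (t - x), count_pvSums_append x p 2 0 t]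
    push_cast
    ring
  · exact PySem.Dict.nodup_keys_insert _ _ _ hn1
  · exact PySem.Dict.nodup_keys_foldl_insert_key st.1.items (fun p => p.1 + x) _ _ hn2
  · exact PySem.Dict.nodup_keys_foldl_insert_key st.2.1.items (fun p => p.1 + x) _ _ hn3
  · intro w hw
    rcases PySem.Dict.mem_values_insert _ _ _ _ hw with hh | hh
    · have := getD_nonneg st.1 hv1 x
      omega
    · exact hv1 w hh
  · exact values_addShift x st.1.items st.2.1 (items_pos hv1) hv2
  · exact values_addShift x st.2.1.items st.2.2 (items_pos hv2) hv3

theorem inv_foldl (nums : List Int) :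
    pvInv nums (nums.foldl pvStep (PySem.Dict.empty, PySem.Dict.empty, PySem.Dict.empty)) := by
  have hgen : ∀ (l pre : List Int) st, pvInv pre st → pvInv (pre ++ l) (l.foldl pvStep st) := by
    intro l
    induction l with
    | nil => intro pre st h; simpa using h
    | cons x xs ih =>
        intro pre st h
        rw [List.foldl_cons, show pre ++ x :: xs = (pre ++ [x]) ++ xs by simp]
        exact ih (pre ++ [x]) _ (inv_step pre st x h)
  have hinit : pvInv [] (PySem.Dict.empty, PySem.Dict.empty, PySem.Dict.empty) := by
    refine ⟨?_, ?_, ?_, PySem.Dict.nodup_keys_empty, PySem.Dict.nodup_keys_empty,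
      PySem.Dict.nodup_keys_empty, ?_, ?_, ?_⟩ <;>
      first
        | (intro t; rw [PySem.Dict.getD_empty]; rfl)
        | (intro w hw; exact absurd hw (by simp [PySem.Dict.values, PySem.Dict.empty]))
  simpa using hgen nums [] _ hinit

theorem countP_split_at (M : List Int) (k : Int) :
    M.countP pvP = (if pvP k then M.count k else 0)
      + (M.filter (fun s => !(s == k))).countP pvP := by
  rw [List.countP_eq_countP_filter_add M pvP (fun s => s == k)]
  congr 1
  rw [List.filter_beq (l := M) k]
  by_cases hk : pvP k
  · simp [hk, List.countP_eq_length_filter]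
  · simp [hk, List.countP_eq_length_filter]

theorem sum_counts :
    ∀ (L : List (Int × Int)) (M : List Int), (L.map (·.1)).Nodup →
      (∀ p ∈ L, p.2 = (M.count p.1 : Int)) → (∀ m ∈ M, m ∈ L.map (·.1)) →
      (L.map (fun p => if pvP p.1 then p.2 else 0)).sum = (M.countP pvP : Int) := by
  intro L
  induction L with
  | nil =>
      intro M _ _ hcov
      have : M = [] := List.eq_nil_iff_forall_not_mem.mpr (fun m hm => by
        simpa using hcov m hm)
      simp [this]
  | cons p R ih =>
      intro M hnd hc hcov
      obtain ⟨k, v⟩ := p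
      have hndk : k ∉ R.map (·.1) := (List.nodup_cons.mp (by simpa using hnd)).1
      have hndR : (R.map (·.1)).Nodup := (List.nodup_cons.mp (by simpa using hnd)).2
      set M' := M.filter (fun s => !(s == k)) with hM'
      have hcR : ∀ q ∈ R, q.2 = (M'.count q.1 : Int) := by
        intro q hq
        have hne : q.1 ≠ k := fun hc' => hndk (hc' ▸ List.mem_map_of_mem hq)
        rw [hM', List.count_filter (by simpa using hne)]
        exact hc q (by simp [hq])
      have hcovR : ∀ m ∈ M', m ∈ R.map (·.1) := by
        intro m hm
        have hmM : m ∈ M := List.mem_of_mem_filter hm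
        have hne : m ≠ k := by
          have := List.of_mem_filter hm
          simpa using this
        have hmem := hcov m hmM
        rw [List.map_cons] at hmem
        rcases List.mem_cons.mp hmem with he | hr
        · exact absurd he hne
        · exact hr
      rw [List.map_cons, List.sum_cons, ih M' hndR hcR hcovR,
        countP_split_at M k, hc (k, v) (by simp)]
      push_cast
      split_ifs <;> ring

theorem final_fold :
    ∀ (L : List (Int × Int)) (a : Int), (∀ p ∈ L, pvInR p.1) →
      L.foldl pvSumBody (some a)
        = some (a + (L.map (fun p => if pvP p.1 then p.2 else 0)).sum) := by
  intro L
  induction L with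
  | nil => intro a _; simp
  | cons p R ih =>
      intro a h
      rw [List.foldl_cons]
      have hb : pvSumBody (some a) p = some (if pvP p.1 then a + p.2 else a) := by
        rw [pvSumBody, Option.bind_some, pvGet_some (h p (by simp)), Option.map_some]
        set X := (PySem.List.pyGet? pvSieve p.1).getD 0 with hX
        have hP : pvP p.1 = (X != 0) := by rw [pvP, hX]
        rw [hP]
        by_cases hX0 : X = 0 <;> simp [hX0]
      rw [hb]
      split_ifs with hP
      · rw [ih _ (fun q hq => h q (by simp [hq]))]
        simp [hP]
        ring
      · rw [ih _ (fun q hq => h q (by simp [hq]))]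
        simp [hP]

theorem solution_alt_char (nums : List Int) (hpre : Pre_solution nums) :
    solution_alt nums = ((pvSums 3 0 nums).countP pvP : Int) := by
  unfold solution_alt
  obtain ⟨h1, h2, h3, hn1, hn2, hn3, hv1, hv2, hv3⟩ := inv_foldl nums
  set D := (nums.foldl pvStep (PySem.Dict.empty, PySem.Dict.empty, PySem.Dict.empty)).2.2 with hD
  set M := pvSums 3 0 nums with hM
  have hfst : (D.items.map (·.1)).Nodup := by simpa [PySem.Dict.keys] using hn3
  have hval : ∀ p ∈ D.items, p.2 = (M.count p.1 : Int) := by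
    intro p hp
    have := PySem.Dict.getD_of_mem_items (d := D) (k := p.1) (v := p.2) (d0 := 0)
      (by simpa using hp) hn3
    rw [← this, h3 p.1]
  have hcov : ∀ m ∈ M, m ∈ D.items.map (·.1) := by
    intro m hm
    by_cases hcont : D.contains m = true
    · simpa [PySem.Dict.keys] using (PySem.Dict.contains_iff_mem_keys D m).mp hcont
    · exfalso
      have h0 : D.getD m 0 = 0 :=
        PySem.Dict.getD_of_not_contains D 0 (by simpa using hcont)
      have hcnt : 0 < M.count m := List.count_pos_iff.mpr hm
      rw [h3 m] at h0
      omega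
  have hin : ∀ p ∈ D.items, pvInR p.1 := by
    intro p hp
    have hpos : 0 < p.2 := items_pos hv3 p hp
    have := hval p hp
    have hcnt : 0 < M.count p.1 := by omega
    exact pre_inR hpre p.1 (List.count_pos_iff.mp hcnt)
  rw [final_fold D.items 0 hin, sum_counts D.items M hfst hval hcov]
  simp

-- ===== VERDICT (by name: the statement is the Claim_ definition above) =====
theorem solution_spec : Claim_equal_solution := by
  intro nums _ hpre
  unfold Spec_solution
  rw [solution_char nums hpre, solution_alt_char nums hpre]
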